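-- pv_equiv track=rewrite | github.com/kbvanzomeren/AoC | 2023/day_14.py | calc_score
-- ===== SOURCE A (Python) =====
-- def calc_score(grid):
--     points = len(grid)
--     score = 0
--     for y, row in enumerate(grid):
--         for r in row:
--             if r == 'O':
--                 score += points - y
--     return score
-- ===== SOURCE B (Python) =====
-- def calc_score(grid):
--     # Prefix-sum identity: sum_y count_y*(n-y) == sum_y (rocks seen in rows 0..y).
--     score = 0
--     running = 0
--     for row in grid:
--         running += sum(1 for r in row if r == 'O')
--         score += running
--     return score
-- ===== Notes on version B (the rewrite author's own statement) =====
-- stated objective: alternative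
-- what changed: Replaces the per-rock weighted accumulation score += (points - y) with a prefix-sum algorithm: a running total of rocks seen so far is added to the score once per row, using the identity sum_y c_y*(n-y) = sum_y prefix_y, so no row indices or weights are computed at all.
import Mathlib
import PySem

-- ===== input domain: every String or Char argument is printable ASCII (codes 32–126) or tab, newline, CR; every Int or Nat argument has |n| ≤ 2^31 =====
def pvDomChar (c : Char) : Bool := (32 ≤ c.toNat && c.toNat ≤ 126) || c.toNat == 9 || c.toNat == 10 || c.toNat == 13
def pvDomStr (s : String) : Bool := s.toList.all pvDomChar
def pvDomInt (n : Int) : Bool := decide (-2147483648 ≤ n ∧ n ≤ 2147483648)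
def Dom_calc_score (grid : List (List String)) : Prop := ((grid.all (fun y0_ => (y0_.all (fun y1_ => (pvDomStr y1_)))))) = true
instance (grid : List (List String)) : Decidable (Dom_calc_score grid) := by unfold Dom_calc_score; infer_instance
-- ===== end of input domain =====

-- B replaces the per-rock (points - y) weighted accumulation with a prefix-sum pass: a running
-- rock total added to the score once per row (alternative algorithm, same cost).


-- ===== PORT A =====
def calc_score (grid : List (List String)) : Int :=
  let points : Int := grid.length
  (PySem.List.enumerate grid).foldl
    (fun score yr =>
      yr.2.foldl (fun s r => if r == "O" then s + (points - yr.1) else s) score)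
    0

-- ===== PORT B =====
def calc_score_alt (grid : List (List String)) : Int :=
  (grid.foldl
    (fun st row =>
      let running := st.1 + row.foldl (fun k r => if r == "O" then k + 1 else k) (0 : Int)
      (running, st.2 + running))
    ((0 : Int), (0 : Int))).2

-- ===== PRECONDITION & SPEC =====
def Spec_calc_score (grid : List (List String)) (out : Int) : Prop := out = calc_score_alt grid
instance (grid : List (List String)) (out : Int) : Decidable (Spec_calc_score grid out) := by unfold Spec_calc_score; infer_instance

-- ===== CLAIM (what is proved, stated in full; the proofs are below) =====
def Claim_equal_calc_score : Prop := ∀ (grid : List (List String)), Dom_calc_score grid → Spec_calc_score grid (calc_score grid)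

-- ===== LEMMAS AND PROOFS =====

-- the inner per-row fold of A adds (count of "O") * c to its accumulator
theorem inner_fold_count (row : List String) (c init : Int) :
    row.foldl (fun s r => if r == "O" then s + c else s) init
      = init + (PySem.List.count row "O" : Int) * c := by
  induction row generalizing init with
  | nil => simp [PySem.List.count]
  | cons r rs ih =>
    simp only [List.foldl_cons, ih, PySem.List.count, List.count_cons]
    by_cases h : r = "O"
    · simp [h]; ring
    · simp [h]

-- A's outer fold is the weighted sum of per-row counts
theorem outer_fold (gs : List (List String)) (p : Int) (s : Int) (init : Int) :
    (PySem.List.enumerate gs s).foldl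
      (fun score yr => yr.2.foldl (fun t r => if r == "O" then t + (p - yr.1) else t) score) init
      = init + ((PySem.List.enumerate gs s).map
          (fun yr => (PySem.List.count yr.2 "O" : Int) * (p - yr.1))).sum := by
  induction gs generalizing s init with
  | nil => simp [PySem.List.enumerate_nil]
  | cons g gs ih =>
    rw [PySem.List.enumerate_cons, List.foldl_cons, List.map_cons, List.sum_cons,
      inner_fold_count, ih]
    ring

-- shifting the enumeration start by 1 while shifting the weight base by 1 preserves the sum
theorem enum_shift (gs : List (List String)) (p s : Int) :
    ((PySem.List.enumerate gs (s + 1)).map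
        (fun yr => (PySem.List.count yr.2 "O" : Int) * (p - yr.1))).sum
      = ((PySem.List.enumerate gs s).map
          (fun yr => (PySem.List.count yr.2 "O" : Int) * ((p - 1) - yr.1))).sum := by
  induction gs generalizing s with
  | nil => simp [PySem.List.enumerate_nil]
  | cons g gs ih =>
    rw [PySem.List.enumerate_cons, PySem.List.enumerate_cons,
      List.map_cons, List.map_cons, List.sum_cons, List.sum_cons, ih]
    ring_nf

-- B's fold, from an arbitrary state, produces the weighted-count sum
theorem b_fold (gs : List (List String)) (r0 s0 : Int) :
    (gs.foldl
      (fun st row =>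
        let running := st.1 + row.foldl (fun k r => if r == "O" then k + 1 else k) (0 : Int)
        (running, st.2 + running))
      (r0, s0)).2
      = s0 + (gs.length : Int) * r0 + ((PySem.List.enumerate gs 0).map
          (fun yr => (PySem.List.count yr.2 "O" : Int) * ((gs.length : Int) - yr.1))).sum := by
  induction gs generalizing r0 s0 with
  | nil => simp [PySem.List.enumerate_nil]
  | cons g gs ih =>
    simp only [List.foldl_cons]
    rw [inner_fold_count, ih]
    have h := enum_shift gs ((gs.length : Int) + 1) 0
    simp only [zero_add, add_sub_cancel_right] at h
    simp only [List.length_cons, PySem.List.enumerate_cons, List.map_cons, List.sum_cons]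
    push_cast
    rw [h]
    ring

-- ===== VERDICT (by name: the statement is the Claim_ definition above) =====
theorem calc_score_spec : Claim_equal_calc_score := by
  intro grid _
  unfold Spec_calc_score calc_score calc_score_alt
  rw [b_fold, outer_fold]
  simp
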